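-- pv_equiv track=rewrite | github.com/MartinMiklos123/MARUTITA | 6.py | foo
-- ===== SOURCE A (Python) =====
-- def foo(text_file):
--     count = 0
--     ini_dict = {}
--     for i in text_file:
--         if i[0][:2] not in ini_dict and i[1] == "nie":
--             ini_dict[i[0][:2]] = 1
--         elif i[0][:2] in ini_dict and i[1] == "nie":
--             ini_dict[i[0][:2]] += 1
--     return ini_dict
-- ===== SOURCE B (Python) =====
-- def foo(text_file):
--     keys = [i[0][:2] for i in text_file if i[1] == "nie"]
--
--     def go(ks):
--         if not ks:
--             return {}
--         h = ks[0]
--         rest = go([x for x in ks[1:] if x != h])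
--         d = {h: ks.count(h)}
--         d.update(rest)
--         return d
--
--     return go(keys)
-- ===== Notes on version B (the rewrite author's own statement) =====
-- stated objective: alternative
-- what changed: Replaces A's single-pass dict-update loop with a recursive remove-and-count: collect qualifying prefixes, then recursively emit (head, total count) and recurse on the tail with that prefix filtered out.
import Mathlib
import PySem

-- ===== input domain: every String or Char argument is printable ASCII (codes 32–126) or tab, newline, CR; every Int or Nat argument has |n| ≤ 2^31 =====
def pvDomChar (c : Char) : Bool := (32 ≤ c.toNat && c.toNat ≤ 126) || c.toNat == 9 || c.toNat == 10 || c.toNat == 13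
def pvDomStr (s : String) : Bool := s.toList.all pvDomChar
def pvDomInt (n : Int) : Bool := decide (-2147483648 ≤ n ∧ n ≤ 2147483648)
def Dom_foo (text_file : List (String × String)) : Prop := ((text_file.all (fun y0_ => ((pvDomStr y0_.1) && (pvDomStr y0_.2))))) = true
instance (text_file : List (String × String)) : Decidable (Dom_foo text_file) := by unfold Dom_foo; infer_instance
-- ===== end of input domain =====

-- B replaces A's single-pass dict-update loop by a recursive remove-and-count over the qualifying prefixes (alternative decomposition, same results).

-- ===== PORT A =====
def foo (text_file : List (String × String)) : List (String × Int) :=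
  (text_file.foldl (fun ini_dict i =>
      if !(ini_dict.contains (PySem.Str.slice i.1 none (some 2))) && (i.2 == "nie") then
        ini_dict.insert (PySem.Str.slice i.1 none (some 2)) 1
      else if ini_dict.contains (PySem.Str.slice i.1 none (some 2)) && (i.2 == "nie") then
        ini_dict.insert (PySem.Str.slice i.1 none (some 2))
          (ini_dict.getD (PySem.Str.slice i.1 none (some 2)) 0 + 1)
      else ini_dict)
    PySem.Dict.empty).items

-- ===== PORT B =====
-- go(ks): emit (head, count of head in ks), recurse on the tail with head's key filtered out.
def fooGo (ks : List String) : List (String × Int) :=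
  match ks with
  | [] => []
  | h :: t =>
      (h, (PySem.List.count (h :: t) h : Int)) :: fooGo (t.filter (fun x => !(x == h)))
termination_by ks.length
decreasing_by
  simp only [List.length_unattach, List.length_cons]
  exact Nat.lt_succ_of_le (le_trans (List.length_filter_le _ _) (by simp))

def foo_alt (text_file : List (String × String)) : List (String × Int) :=
  fooGo ((text_file.filter (fun i => i.2 == "nie")).map (fun i => PySem.Str.slice i.1 none (some 2)))

-- ===== PRECONDITION & SPEC =====
def Spec_foo (text_file : List (String × String)) (out : List (String × Int)) : Prop := out = foo_alt text_file
instance (text_file : List (String × String)) (out : List (String × Int)) : Decidable (Spec_foo text_file out) := by unfold Spec_foo; infer_instance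

-- ===== CLAIM (what is proved, stated in full; the proofs are below) =====
def Claim_equal_foo : Prop := ∀ (text_file : List (String × String)), Dom_foo text_file → Spec_foo text_file (foo text_file)

-- ===== LEMMAS AND PROOFS =====

-- A's loop body equals: "if the entry says 'nie', increment the prefix's counter (defaulting to 0)".
theorem foo_step_eq (d : PySem.Dict String Int) (i : String × String) :
    (if !(d.contains (PySem.Str.slice i.1 none (some 2))) && (i.2 == "nie") then
        d.insert (PySem.Str.slice i.1 none (some 2)) 1
      else if d.contains (PySem.Str.slice i.1 none (some 2)) && (i.2 == "nie") then
        d.insert (PySem.Str.slice i.1 none (some 2))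
          (d.getD (PySem.Str.slice i.1 none (some 2)) 0 + 1)
      else d)
      = if (i.2 == "nie") = true then
          d.insert (PySem.Str.slice i.1 none (some 2))
            (d.getD (PySem.Str.slice i.1 none (some 2)) 0 + 1)
        else d := by
  set k := PySem.Str.slice i.1 none (some 2) with hk
  by_cases hc : d.contains k = true
  · by_cases hn : (i.2 == "nie") = true <;> simp [hc, hn]
  · by_cases hn : (i.2 == "nie") = true <;>
      simp [hc, hn, PySem.Dict.getD_of_not_contains d 0 (eq_false_of_ne_true hc)]

-- unfolding equations for the well-founded fooGo
theorem fooGo_nil : fooGo [] = [] := by conv_lhs => unfold fooGo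

theorem fooGo_cons (h : String) (t : List String) :
    fooGo (h :: t)
      = (h, (PySem.List.count (h :: t) h : Int)) :: fooGo (t.filter (fun x => !(x == h))) := by
  conv_lhs => unfold fooGo

-- first-occurrence dedup commutes with filtering
theorem filter_ofList {α : Type} [BEq α] [LawfulBEq α] (p : α → Bool) (xs : List α) :
    (PySem.Set.ofList xs).filter p = PySem.Set.ofList (xs.filter p) := by
  induction xs with
  | nil => simp [PySem.Set.ofList_nil]
  | cons a xs ih =>
    rw [PySem.Set.ofList_cons, List.filter_cons, List.filter_cons]
    by_cases hp : p a = true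
    · simp only [hp, if_pos]
      rw [PySem.Set.ofList_cons]
      simp only [PySem.Set.discard, List.filter_filter, ← ih, List.filter_filter]
      congr 1
      exact List.filter_congr (fun y _ => by rw [Bool.and_comm])
    · simp only [hp, if_neg, Bool.false_eq_true, not_false_iff]
      rw [← ih]
      simp only [PySem.Set.discard, List.filter_filter]
      exact List.filter_congr (fun y _ => by
        by_cases hy : (y == a) = true
        · have : y = a := by simpa using hy
          subst this
          simp [hp]
        · simp [hy])

-- the recursive remove-and-count equals "map count over the first occurrences"
theorem fooGo_spec (ks : List String) :
    fooGo ks = (PySem.Set.ofList ks).map (fun k => (k, (ks.count k : Int))) := by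
  induction hn : ks.length using Nat.strong_induction_on generalizing ks with
  | _ n ih =>
    match ks with
    | [] => simp [fooGo_nil, PySem.Set.ofList_nil]
    | h :: t =>
      rw [fooGo_cons]
      have hlen : (t.filter (fun x => !(x == h))).length < n := by
        subst hn
        exact Nat.lt_succ_of_le (List.length_filter_le _ t)
      rw [ih _ hlen _ rfl]
      rw [PySem.Set.ofList_cons, List.map_cons]
      have hdis : (PySem.Set.ofList t).discard h
          = PySem.Set.ofList (t.filter (fun x => !(x == h))) := by
        simpa [PySem.Set.discard] using filter_ofList (fun y => !(y == h)) t
      rw [hdis]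
      congr 1
      apply List.map_congr_left
      intro k hk
      have hkmem : k ∈ t.filter (fun x => !(x == h)) :=
        (PySem.Set.mem_ofList (xs := t.filter (fun x => !(x == h))) (y := k)).mp hk
      have hkh : (k == h) = false := by
        have := List.of_mem_filter hkmem
        simpa using this
      have hkh' : k ≠ h := by simpa using hkh
      congr 1
      rw [List.count_filter]
      simp [List.count_cons]
      all_goals first | exact Ne.symm hkh' | simpa using hkh'

-- ===== VERDICT (by name: the statement is the Claim_ definition above) =====
theorem foo_spec : Claim_equal_foo := by
  intro tf _
  unfold Spec_foo foo foo_alt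
  rw [PySem.List.foldl_congr_mem tf
      (fun ini_dict i =>
        if !(ini_dict.contains (PySem.Str.slice i.1 none (some 2))) && (i.2 == "nie") then
          ini_dict.insert (PySem.Str.slice i.1 none (some 2)) 1
        else if ini_dict.contains (PySem.Str.slice i.1 none (some 2)) && (i.2 == "nie") then
          ini_dict.insert (PySem.Str.slice i.1 none (some 2))
            (ini_dict.getD (PySem.Str.slice i.1 none (some 2)) 0 + 1)
        else ini_dict)
      (fun d i =>
        if (i.2 == "nie") = true then
          d.insert (PySem.Str.slice i.1 none (some 2))
            (d.getD (PySem.Str.slice i.1 none (some 2)) 0 + 1)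
        else d)
      PySem.Dict.empty (fun d i _ => foo_step_eq d i)]
  simp only [PySem.List.foldl_if_eq_foldl_filter]
  rw [show ((tf.filter (fun x => x.2 == "nie")).foldl
        (fun acc x => acc.insert (PySem.Str.slice x.1 none (some 2))
          (acc.getD (PySem.Str.slice x.1 none (some 2)) 0 + 1)) (PySem.Dict.empty : PySem.Dict String Int))
      = (((tf.filter (fun x => x.2 == "nie")).map (fun i => PySem.Str.slice i.1 none (some 2))).foldl
        (fun d x => d.insert x (d.getD x 0 + 1)) PySem.Dict.empty)
    from (List.foldl_map (f := fun i : String × String => PySem.Str.slice i.1 none (some 2))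
      (g := fun (d : PySem.Dict String Int) x => d.insert x (d.getD x 0 + 1))).symm]
  rw [PySem.Dict.foldl_insert_getD_add_one_eq_counter, PySem.Dict.items_counter, fooGo_spec]
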